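-- pv_equiv track=rewrite | github.com/awslabs/specctl | specctl/k8s2ecs/ingress.py | merge_ingress_rules
-- ===== SOURCE A (Python) =====
-- def merge_ingress_rules(rules1, rules2):
--     listener_dict = {}
--     for rule_name, rule in rules1.items():
--         listener_name = rule.get("listener_name")
--         if listener_name is None: continue
--         if listener_name not in listener_dict:
--             listener_dict[listener_name]=[]
--         listener_dict[listener_name].append(rule)
--     for rule_name, rule in rules2.items():
--         listener_name = rule.get("listener_name")
--         if listener_name is None: continue
--         if listener_name not in listener_dict:
--             listener_dict[listener_name]=[]
--         listener_dict[listener_name].append(rule)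
--
--     return_rules_dict = {}
--     for listener_name, rules in listener_dict.items():
--         rule_count = 0
--         for r in rules:
--             rule_name = listener_name+"-"+"rule"+"-"+str(rule_count)
--             return_rules_dict[rule_name]=r
--             rule_count += 1
--     return return_rules_dict
-- ===== SOURCE B (Python) =====
-- def merge_ingress_rules(rules1, rules2):
--     rules = list(rules1.values()) + list(rules2.values())
--     listeners = []
--     for r in rules:
--         ln = r.get("listener_name")
--         if ln is not None and ln not in listeners:
--             listeners.append(ln)
--     out = {}
--     for ln in listeners:
--         matching = [r for r in rules if r.get("listener_name") == ln]
--         for i, r in enumerate(matching):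
--             out[ln + "-rule-" + str(i)] = r
--     return out
-- ===== Notes on version B (the rewrite author's own statement) =====
-- stated objective: alternative
-- what changed: Replaces A's mutable dict-of-lists grouping pass with a first-appearance listener list plus a per-listener filter scan over the concatenated rule values, renumbering while emitting.
import Mathlib
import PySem

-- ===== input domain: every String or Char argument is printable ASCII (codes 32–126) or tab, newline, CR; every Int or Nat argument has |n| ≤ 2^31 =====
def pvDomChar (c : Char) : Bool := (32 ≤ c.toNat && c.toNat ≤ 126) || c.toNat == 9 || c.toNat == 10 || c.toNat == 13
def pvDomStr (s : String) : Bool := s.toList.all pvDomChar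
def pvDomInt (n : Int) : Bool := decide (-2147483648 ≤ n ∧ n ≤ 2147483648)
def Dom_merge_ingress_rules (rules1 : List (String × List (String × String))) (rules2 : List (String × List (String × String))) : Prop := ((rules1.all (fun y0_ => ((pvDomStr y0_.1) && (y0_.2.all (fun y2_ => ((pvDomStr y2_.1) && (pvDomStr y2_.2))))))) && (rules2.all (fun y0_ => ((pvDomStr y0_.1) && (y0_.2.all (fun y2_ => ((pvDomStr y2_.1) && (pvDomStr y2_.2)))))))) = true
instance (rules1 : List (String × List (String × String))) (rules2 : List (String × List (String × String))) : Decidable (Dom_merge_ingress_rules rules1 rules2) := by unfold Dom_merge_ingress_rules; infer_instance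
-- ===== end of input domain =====

-- B fuses nothing away but restructures: instead of A's dict-of-lists grouping pass, B collects the
-- distinct listener names in first-appearance order and then emits each listener's rules by a direct
-- filter scan over the concatenated rule list (objective: alternative; same result, different traversal).

-- ===== PORT A =====
-- one step of A's grouping loop body (identical for both input dicts)
def pvAStep (ld : PySem.Dict String (List (List (String × String)))) (p : String × List (String × String)) : PySem.Dict String (List (List (String × String))) :=
  match PySem.Dict.get? ⟨p.2⟩ "listener_name" with
  | none => ld
  | some ln =>
      let ld1 := if ld.contains ln then ld else ld.insert ln []
      ld1.modify ln [] (fun g => g ++ [p.2])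

def merge_ingress_rules (rules1 : List (String × List (String × String))) (rules2 : List (String × List (String × String))) : List (String × List (String × String)) :=
  let listener_dict := rules2.foldl pvAStep (rules1.foldl pvAStep PySem.Dict.empty)
  (listener_dict.items.foldl
    (fun (acc : PySem.Dict String (List (String × String))) g =>
      (g.2.foldl
        (fun (st : PySem.Dict String (List (String × String)) × Int) r =>
          (st.1.insert (g.1 ++ "-" ++ "rule" ++ "-" ++ PySem.Int.toStr st.2) r, st.2 + 1))
        (acc, (0 : Int))).1)
    PySem.Dict.empty).items

-- ===== PORT B =====
def merge_ingress_rules_alt (rules1 : List (String × List (String × String))) (rules2 : List (String × List (String × String))) : List (String × List (String × String)) :=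
  let rules := rules1.map Prod.snd ++ rules2.map Prod.snd
  let listeners := rules.foldl
    (fun (ls : List String) r =>
      match PySem.Dict.get? ⟨r⟩ "listener_name" with
      | none => ls
      | some ln => if ln ∈ ls then ls else ls ++ [ln]) []
  (listeners.foldl
    (fun (out : PySem.Dict String (List (String × String))) ln =>
      let matching := rules.filter (fun r => PySem.Dict.get? ⟨r⟩ "listener_name" == some ln)
      (matching.foldl
        (fun (st : PySem.Dict String (List (String × String)) × Int) r =>
          (st.1.insert (ln ++ "-rule-" ++ PySem.Int.toStr st.2) r, st.2 + 1))
        (out, (0 : Int))).1)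
    PySem.Dict.empty).items

-- ===== PRECONDITION & SPEC =====
def Spec_merge_ingress_rules (rules1 : List (String × List (String × String))) (rules2 : List (String × List (String × String))) (out : List (String × List (String × String))) : Prop := out = merge_ingress_rules_alt rules1 rules2
instance (rules1 : List (String × List (String × String))) (rules2 : List (String × List (String × String))) (out : List (String × List (String × String))) : Decidable (Spec_merge_ingress_rules rules1 rules2 out) := by unfold Spec_merge_ingress_rules; infer_instance

-- ===== CLAIM (what is proved, stated in full; the proofs are below) =====
def Claim_equal_merge_ingress_rules : Prop := ∀ (rules1 : List (String × List (String × String))) (rules2 : List (String × List (String × String))), Dom_merge_ingress_rules rules1 rules2 → Spec_merge_ingress_rules rules1 rules2 (merge_ingress_rules rules1 rules2)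

-- ===== LEMMAS AND PROOFS =====

-- abbreviations used only by the proofs
def pvLn (r : List (String × String)) : Option String := PySem.Dict.get? ⟨r⟩ "listener_name"

def pvLStep (ls : List String) (r : List (String × String)) : List String :=
  match pvLn r with
  | none => ls
  | some ln => if ln ∈ ls then ls else ls ++ [ln]

def pvLs (rs : List (List (String × String))) : List String := rs.foldl pvLStep []

def pvF (rs : List (List (String × String))) (ln : String) : List (List (String × String)) :=
  rs.filter (fun r => pvLn r == some ln)

lemma pvLs_append (rs : List (List (String × String))) (r : List (String × String)) :
    pvLs (rs ++ [r]) = pvLStep (pvLs rs) r := by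
  unfold pvLs; rw [List.foldl_append]; rfl

lemma pvLStep_none (ls : List String) (r : List (String × String)) (h : pvLn r = none) :
    pvLStep ls r = ls := by
  simp [pvLStep, h]

lemma pvLStep_some (ls : List String) (r : List (String × String)) (ln : String)
    (h : pvLn r = some ln) : pvLStep ls r = if ln ∈ ls then ls else ls ++ [ln] := by
  simp [pvLStep, h]

lemma pvLs_mem (rs : List (List (String × String))) (ln : String) :
    ln ∈ pvLs rs ↔ ∃ r ∈ rs, pvLn r = some ln := by
  induction rs using List.reverseRecOn with
  | nil => simp [pvLs]
  | append_singleton rs r ih =>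
      rw [pvLs_append]
      cases h : pvLn r with
      | none =>
          rw [pvLStep_none _ _ h, ih]
          constructor
          · rintro ⟨r', hr', he⟩; exact ⟨r', by simp [hr'], he⟩
          · rintro ⟨r', hr', he⟩
            rcases List.mem_append.mp hr' with h1 | h1
            · exact ⟨r', h1, he⟩
            · rw [List.mem_singleton.mp h1, h] at he; cases he
      | some ln0 =>
          rw [pvLStep_some _ _ _ h]
          by_cases hm : ln0 ∈ pvLs rs
          · rw [if_pos hm, ih]
            constructor
            · rintro ⟨r', hr', he⟩; exact ⟨r', by simp [hr'], he⟩
            · rintro ⟨r', hr', he⟩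
              rcases List.mem_append.mp hr' with h1 | h1
              · exact ⟨r', h1, he⟩
              · rw [List.mem_singleton.mp h1, h] at he
                obtain ⟨r'', hr'', he''⟩ := ih.mp (Option.some_inj.mp he ▸ hm)
                exact ⟨r'', hr'', he''⟩
          · rw [if_neg hm]
            constructor
            · intro hmem
              rcases List.mem_append.mp hmem with h1 | h1
              · obtain ⟨r', hr', he⟩ := ih.mp h1
                exact ⟨r', by simp [hr'], he⟩
              · exact ⟨r, by simp, by rw [h, List.mem_singleton.mp h1]⟩
            · rintro ⟨r', hr', he⟩
              rcases List.mem_append.mp hr' with h1 | h1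
              · exact List.mem_append.mpr (Or.inl (ih.mpr ⟨r', h1, he⟩))
              · rw [List.mem_singleton.mp h1, h] at he
                exact List.mem_append.mpr (Or.inr (by simp [Option.some_inj.mp he]))

lemma pvLs_nodup (rs : List (List (String × String))) : (pvLs rs).Nodup := by
  induction rs using List.reverseRecOn with
  | nil => simp [pvLs]
  | append_singleton rs r ih =>
      rw [pvLs_append]
      cases h : pvLn r with
      | none => rw [pvLStep_none _ _ h]; exact ih
      | some ln0 =>
          rw [pvLStep_some _ _ _ h]
          by_cases hm : ln0 ∈ pvLs rs
          · rw [if_pos hm]; exact ih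
          · rw [if_neg hm]
            refine List.Nodup.append ih (List.nodup_singleton _) ?_
            intro a ha hb
            exact hm ((List.mem_singleton.mp hb) ▸ ha)

-- the crux: A's listener_dict (as a fold of pvAStep over the value list) is the
-- first-appearance listener list paired with the filter of the whole scanned prefix
lemma pvGroup_eq (rs : List (List (String × String))) :
    (rs.foldl (fun ld r => pvAStep ld ("", r)) PySem.Dict.empty).items
      = (pvLs rs).map (fun ln => (ln, pvF rs ln)) := by
  induction rs using List.reverseRecOn with
  | nil => simp [pvLs, PySem.Dict.empty]
  | append_singleton rs r ih =>
      rw [List.foldl_append]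
      simp only [List.foldl_cons, List.foldl_nil]
      have hLs : pvLs (rs ++ [r]) = pvLStep (pvLs rs) r := by
        unfold pvLs; rw [List.foldl_append]; rfl
      have hF : ∀ ln, pvF (rs ++ [r]) ln
          = pvF rs ln ++ (if (pvLn r == some ln) = true then [r] else []) := by
        intro ln; unfold pvF; rw [List.filter_append, List.filter_singleton]
        cases hc : (pvLn r == some ln) <;> rfl
      set D := rs.foldl (fun ld r => pvAStep ld ("", r)) PySem.Dict.empty with hD
      have hkeys : D.keys = pvLs rs := by
        unfold PySem.Dict.keys
        rw [ih, List.map_map]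
        have hid : ((fun (x : String × List (List (String × String))) => x.1)
            ∘ fun ln => (ln, pvF rs ln)) = id := funext fun ln => rfl
        rw [hid, List.map_id]
      unfold pvAStep
      simp only []
      cases h : PySem.Dict.get? (⟨r⟩ : PySem.Dict String String) "listener_name" with
      | none =>
          have hln : pvLn r = none := h
          rw [ih, hLs]
          unfold pvLStep; rw [hln]
          dsimp only
          apply List.map_congr_left
          intro ln _
          simp [hF, hln]
      | some ln0 =>
          have hln : pvLn r = some ln0 := h
          rw [hLs]; unfold pvLStep; rw [hln]
          dsimp only
          by_cases hm : ln0 ∈ pvLs rs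
          · -- listener already present: contains is true, entry gets r appended
            have hc : D.contains ln0 = true := by
              rw [PySem.Dict.contains_iff_mem_keys, hkeys]; exact hm
            have hmem : (ln0, pvF rs ln0) ∈ D.items := by
              rw [ih]; exact List.mem_map.mpr ⟨ln0, hm, rfl⟩
            have hget : D.getD ln0 [] = pvF rs ln0 :=
              PySem.Dict.getD_of_mem_items D hmem (by rw [hkeys]; exact pvLs_nodup rs) []
            rw [if_pos hc]
            unfold PySem.Dict.modify
            rw [hget, PySem.Dict.items_insert_of_contains D _ hc, ih, List.map_map,
                if_pos hm]
            apply List.map_congr_left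
            intro ln _
            by_cases he : ln = ln0
            · subst he; simp [hF, hln]
            · simp [hF, hln, he, Ne.symm he]
          · -- fresh listener: [] is inserted, then r appended
            have hc : D.contains ln0 = false := by
              rw [Bool.eq_false_iff]
              intro hcc
              exact hm (by rw [← hkeys]; exact (PySem.Dict.contains_iff_mem_keys D ln0).mp hcc)
            rw [if_neg (by simp [hc])]
            have hc2 : (D.insert ln0 []).contains ln0 = true := by
              rw [PySem.Dict.contains_iff_mem_keys]
              simp [PySem.Dict.mem_keys_insert]
            have hitems1 : (D.insert ln0 []).items = D.items ++ [(ln0, [])] :=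
              PySem.Dict.items_insert_of_not_contains D _ hc
            have hkeys1 : (D.insert ln0 []).keys = pvLs rs ++ [ln0] := by
              unfold PySem.Dict.keys; rw [hitems1]; simp [hkeys.symm, PySem.Dict.keys]
            have hget : (D.insert ln0 []).getD ln0 [] = ([] : List (List (String × String))) := by
              apply PySem.Dict.getD_of_mem_items
              · rw [hitems1]; simp
              · rw [hkeys1]
                refine List.Nodup.append (pvLs_nodup rs) (List.nodup_singleton _) ?_
                intro a ha hb
                exact hm ((List.mem_singleton.mp hb) ▸ ha)
            unfold PySem.Dict.modify
            rw [hget, PySem.Dict.items_insert_of_contains _ _ hc2, hitems1, if_neg hm]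
            rw [List.map_append, ih, List.map_map, List.map_append]
            have hnil : pvF rs ln0 = [] := by
              unfold pvF
              rw [List.filter_eq_nil_iff]
              intro r' hr'
              simp only [beq_iff_eq]
              intro hcontra
              exact hm ((pvLs_mem rs ln0).mpr ⟨r', hr', hcontra⟩)
            congr 1
            · apply List.map_congr_left
              intro ln hlnmem
              have he : ln ≠ ln0 := fun hh => hm (hh ▸ hlnmem)
              simp [hF, hln, he, Ne.symm he]
            · simp [hF, hln, hnil]

-- the two key-building strings agree
lemma pvKey_eq (ln : String) (n : Int) :
    ln ++ "-" ++ "rule" ++ "-" ++ PySem.Int.toStr n = ln ++ "-rule-" ++ PySem.Int.toStr n := by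
  simp only [String.append_assoc]
  congr 1

-- ===== VERDICT (by name: the statement is the Claim_ definition above) =====
theorem merge_ingress_rules_spec : Claim_equal_merge_ingress_rules := by
  intro rules1 rules2 _
  unfold Spec_merge_ingress_rules
  simp only [merge_ingress_rules, merge_ingress_rules_alt]
  -- fuse A's two grouping loops into one fold over the concatenated value list
  have hA : rules2.foldl pvAStep (rules1.foldl pvAStep PySem.Dict.empty)
      = (rules1.map Prod.snd ++ rules2.map Prod.snd).foldl
          (fun ld r => pvAStep ld ("", r)) PySem.Dict.empty := by
    rw [List.foldl_append, List.foldl_map, List.foldl_map]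
    have hfun : (fun (x : PySem.Dict String (List (List (String × String))))
        (y : String × List (String × String)) => pvAStep x ("", y.2)) = pvAStep := by
      funext x y; rfl
    rw [hfun]
  rw [hA, pvGroup_eq, List.foldl_map]
  dsimp only
  simp only [pvKey_eq]
  rfl
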